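-- pv_equiv track=rewrite | github.com/NicholasJohansan/MiniProjects | Games/chess.py | get_all_possible_tiles
-- ===== SOURCE A (Python) =====
-- def get_all_possible_tiles(current_tile):
-- 	possible_moves = {
-- 		"ne": [],
-- 		"se": [],
-- 		"sw": [],
-- 		"nw": [],
-- 		"n": [],
-- 		"s": [],
-- 		"w": [],
-- 		"e": []
-- 	}
-- 	for key in possible_moves.keys():
-- 		func = {
-- 			"ne": lambda row, col: (row-1, col+1),
-- 			"se": lambda row, col: (row+1, col+1),
-- 			"sw": lambda row, col: (row+1, col-1),
-- 			"nw": lambda row, col: (row-1, col-1),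
-- 			"n": lambda row, col: (row-1, col),
-- 			"s": lambda row, col: (row+1, col),
-- 			"w": lambda row, col: (row, col-1),
-- 			"e": lambda row, col: (row, col+1)
-- 		}.get(key)
-- 		row, col = current_tile
-- 		while not (row <= 0 or row >= 7 or col <= 0 or col >= 7):
-- 			row, col = func(row, col)
-- 			possible_moves[key].append((row, col))
-- 	return possible_moves
-- ===== SOURCE B (Python) =====
-- def get_all_possible_tiles(current_tile):
-- 	row, col = current_tile
-- 	n, s, w, e = row, 7 - row, col, 7 - col
-- 	if min(n, s, w, e) <= 0:
-- 		return {k: [] for k in ("ne", "se", "sw", "nw", "n", "s", "w", "e")}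
-- 	rays = {
-- 		"ne": (-1, 1, min(n, e)),
-- 		"se": (1, 1, min(s, e)),
-- 		"sw": (1, -1, min(s, w)),
-- 		"nw": (-1, -1, min(n, w)),
-- 		"n": (-1, 0, n),
-- 		"s": (1, 0, s),
-- 		"w": (0, -1, w),
-- 		"e": (0, 1, e)
-- 	}
-- 	return {k: [(row + i*dr, col + i*dc) for i in range(1, steps + 1)]
-- 		for k, (dr, dc, steps) in rays.items()}
-- ===== Notes on version B (the rewrite author's own statement) =====
-- stated objective: simpler
-- what changed: Replaced A's eight step-until-edge while loops (with a dict of lambdas selected per key) by closed-form ray lengths from the distances to the four edges and range comprehensions, with a single early return of all-empty rays when the start tile is on or beyond an edge.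
import Mathlib
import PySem

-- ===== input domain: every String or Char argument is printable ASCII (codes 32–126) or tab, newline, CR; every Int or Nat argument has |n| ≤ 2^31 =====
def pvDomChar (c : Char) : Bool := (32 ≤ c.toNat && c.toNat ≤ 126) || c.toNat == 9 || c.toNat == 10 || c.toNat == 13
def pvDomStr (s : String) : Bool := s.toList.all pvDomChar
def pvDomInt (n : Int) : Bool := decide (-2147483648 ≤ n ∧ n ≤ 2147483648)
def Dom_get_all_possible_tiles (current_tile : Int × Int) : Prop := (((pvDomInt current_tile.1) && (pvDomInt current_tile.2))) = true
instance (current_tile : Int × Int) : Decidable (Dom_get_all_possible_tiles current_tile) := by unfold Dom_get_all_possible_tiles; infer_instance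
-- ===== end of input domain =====

-- B replaces A's per-direction step-until-edge while loops by closed-form ray lengths
-- (distance to each edge) and range comprehensions: simpler, no loops.


-- ===== PORT A =====
-- the per-key step function (the dict-of-lambdas .get(key); keys are always one of the eight)
def pvStep (k : String) (rc : Int × Int) : Int × Int :=
  if k = "ne" then (rc.1 - 1, rc.2 + 1)
  else if k = "se" then (rc.1 + 1, rc.2 + 1)
  else if k = "sw" then (rc.1 + 1, rc.2 - 1)
  else if k = "nw" then (rc.1 - 1, rc.2 - 1)
  else if k = "n" then (rc.1 - 1, rc.2)
  else if k = "s" then (rc.1 + 1, rc.2)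
  else if k = "w" then (rc.1, rc.2 - 1)
  else (rc.1, rc.2 + 1)

-- A's while loop: while inside the board interior, step and append.  Fuel 8 is a
-- totality guard only: the loop body runs only while 1 ≤ row,col ≤ 6, so at most
-- 6 iterations ever happen and the fuel is never exhausted.
def pvLoop (k : String) (rc : Int × Int) : Nat → List (Int × Int)
  | 0 => []
  | Nat.succ fuel =>
    if rc.1 ≤ 0 ∨ rc.1 ≥ 7 ∨ rc.2 ≤ 0 ∨ rc.2 ≥ 7 then []
    else
      let rc' := pvStep k rc
      rc' :: pvLoop k rc' fuel

def get_all_possible_tiles (current_tile : Int × Int) : List (String × List (Int × Int)) :=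
  ["ne", "se", "sw", "nw", "n", "s", "w", "e"].map (fun k => (k, pvLoop k current_tile 8))

-- ===== PORT B =====
def get_all_possible_tiles_alt (current_tile : Int × Int) : List (String × List (Int × Int)) :=
  let row := current_tile.1
  let col := current_tile.2
  let n := row
  let s := 7 - row
  let w := col
  let e := 7 - col
  if min (min n s) (min w e) ≤ 0 then
    [("ne", []), ("se", []), ("sw", []), ("nw", []), ("n", []), ("s", []), ("w", []), ("e", [])]
  else
    let ray := fun (dr dc steps : Int) =>
      (PySem.List.pyRange 1 (steps + 1) 1).map (fun i => (row + i * dr, col + i * dc))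
    [("ne", ray (-1) 1 (min n e)),
     ("se", ray 1 1 (min s e)),
     ("sw", ray 1 (-1) (min s w)),
     ("nw", ray (-1) (-1) (min n w)),
     ("n", ray (-1) 0 n),
     ("s", ray 1 0 s),
     ("w", ray 0 (-1) w),
     ("e", ray 0 1 e)]

-- ===== PRECONDITION & SPEC =====
def Spec_get_all_possible_tiles (current_tile : Int × Int) (out : List (String × List (Int × Int))) : Prop := out = get_all_possible_tiles_alt current_tile
instance (current_tile : Int × Int) (out : List (String × List (Int × Int))) : Decidable (Spec_get_all_possible_tiles current_tile out) := by unfold Spec_get_all_possible_tiles; infer_instance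

-- ===== CLAIM (what is proved, stated in full; the proofs are below) =====
def Claim_equal_get_all_possible_tiles : Prop := ∀ (current_tile : Int × Int), Dom_get_all_possible_tiles current_tile → Spec_get_all_possible_tiles current_tile (get_all_possible_tiles current_tile)

-- ===== LEMMAS AND PROOFS =====
lemma pvLoop_edge (k : String) (rc : Int × Int)
    (h : rc.1 ≤ 0 ∨ rc.1 ≥ 7 ∨ rc.2 ≤ 0 ∨ rc.2 ≥ 7) : pvLoop k rc 8 = [] := by
  show pvLoop k rc (Nat.succ 7) = []
  rw [pvLoop, if_pos h]

-- ===== VERDICT (by name: the statement is the Claim_ definition above) =====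
theorem get_all_possible_tiles_spec : Claim_equal_get_all_possible_tiles := by
  intro ct _
  obtain ⟨row, col⟩ := ct
  unfold Spec_get_all_possible_tiles
  by_cases h : row ≤ 0 ∨ row ≥ 7 ∨ col ≤ 0 ∨ col ≥ 7
  · simp only [get_all_possible_tiles, get_all_possible_tiles_alt, List.map]
    rw [pvLoop_edge _ _ h, pvLoop_edge _ _ h, pvLoop_edge _ _ h, pvLoop_edge _ _ h,
        pvLoop_edge _ _ h, pvLoop_edge _ _ h, pvLoop_edge _ _ h, pvLoop_edge _ _ h,
        if_pos (by omega)]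
  · have h1 : 1 ≤ row := by omega
    have h2 : row ≤ 6 := by omega
    have h3 : 1 ≤ col := by omega
    have h4 : col ≤ 6 := by omega
    interval_cases row <;> interval_cases col <;> decide
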